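-- pv_equiv track=rewrite | github.com/KaiWenyy/Google-Analytics-Customer-Revenue-Prediction | nn_model/utils.py | combine_test_result
-- ===== SOURCE A (Python) =====
-- def combine_test_result(buy_index, pred, original_n):
-- 	result = []
-- 	count = 0
-- 	for i in range(original_n):
-- 		if i in buy_index:
-- 			result.append(pred[count])
-- 			count += 1
-- 		else:
-- 			result.append(0)
-- 	assert len(result) == original_n, "Length not match for testing results."
-- 	return result
-- ===== SOURCE B (Python) =====
-- def combine_test_result(buy_index, pred, original_n):
-- 	result = [0] * original_n
-- 	positions = sorted(i for i in set(buy_index) if 0 <= i < original_n)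
-- 	for j, pos in enumerate(positions):
-- 		result[pos] = pred[j]
-- 	assert len(result) == original_n, "Length not match for testing results."
-- 	return result
-- ===== Notes on version B (the rewrite author's own statement) =====
-- stated objective: faster
-- what changed: B preallocates a zero vector and scatters pred into the sorted, deduped, range-filtered index positions, instead of scanning every slot of range(original_n) with an O(len(buy_index)) membership test.
import Mathlib
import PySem

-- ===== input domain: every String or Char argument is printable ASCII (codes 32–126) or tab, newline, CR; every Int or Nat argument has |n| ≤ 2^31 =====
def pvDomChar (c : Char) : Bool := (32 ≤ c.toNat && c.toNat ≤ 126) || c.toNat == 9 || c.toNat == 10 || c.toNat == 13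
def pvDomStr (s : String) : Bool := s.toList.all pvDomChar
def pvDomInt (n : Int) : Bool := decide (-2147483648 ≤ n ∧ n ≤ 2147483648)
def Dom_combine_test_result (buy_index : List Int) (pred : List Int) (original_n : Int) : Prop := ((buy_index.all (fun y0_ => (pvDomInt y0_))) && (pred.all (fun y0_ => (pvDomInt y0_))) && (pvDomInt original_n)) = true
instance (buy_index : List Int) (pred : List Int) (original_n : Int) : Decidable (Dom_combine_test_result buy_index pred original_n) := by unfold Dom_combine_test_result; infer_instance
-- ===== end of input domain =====

-- B scatters pred into a preallocated zero vector at the sorted deduped in-range indices,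
-- instead of A's scan of every slot of range(original_n) with a list-membership test; return-value equivalence.

-- ===== PORT A =====
-- loop body of A: if i in buy_index: result.append(pred[count]); count += 1 else result.append(0)
-- (Option threads the possible IndexError of pred[count]; none = raised)
def stepA_cr (buy_index pred : List Int) (acc : Option (List Int × Int)) (i : Int) : Option (List Int × Int) :=
  acc.bind fun rc =>
    if buy_index.contains i then
      (PySem.List.pyGet? pred rc.2).map (fun v => (rc.1 ++ [v], rc.2 + 1))
    else some (rc.1 ++ [0], rc.2)

def combine_test_result (buy_index : List Int) (pred : List Int) (original_n : Int) : List Int :=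
  match (PySem.List.pyRange 0 original_n 1).foldl (stepA_cr buy_index pred) (some ([], 0)) with
  | some rc => if (rc.1.length : Int) = original_n then rc.1 else []  -- assert; else branch = AssertionError, outside Pre_
  | none => []  -- IndexError, outside Pre_

-- ===== PORT B =====
-- loop body of B: result[pos] = pred[j]  (Option threads the possible IndexError of pred[j];
-- pySetD is exact here: every pos passed the 0 <= pos < original_n filter)
def stepB_cr (pred : List Int) (acc : Option (List Int)) (jp : Int × Int) : Option (List Int) :=
  acc.bind fun r => (PySem.List.pyGet? pred jp.1).map (fun v => PySem.List.pySetD r jp.2 v)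

def combine_test_result_alt (buy_index : List Int) (pred : List Int) (original_n : Int) : List Int :=
  let result0 : List Int := List.replicate original_n.toNat 0  -- [0]*original_n ([] when negative)
  let positions : List Int :=
    PySem.List.sorted ((PySem.Set.ofList buy_index).filter
      (fun i => decide (0 ≤ i) && decide (i < original_n))) (fun x => x) false
  match (PySem.List.enumerate positions 0).foldl (stepB_cr pred) (some result0) with
  | some r => if (r.length : Int) = original_n then r else []  -- assert; else branch outside Pre_
  | none => []  -- IndexError, outside Pre_

-- ===== PRECONDITION & SPEC =====
-- Pre_ excludes exactly the inputs where the Python A raises: original_n < 0 (AssertionError: the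
-- built list is empty but original_n isn't) and too-short pred (IndexError on pred[count]); B raises there too.
def Pre_combine_test_result (buy_index : List Int) (pred : List Int) (original_n : Int) : Prop :=
  0 ≤ original_n ∧
  ((PySem.Set.ofList buy_index).filter
    (fun i => decide (0 ≤ i) && decide (i < original_n))).length ≤ pred.length
instance (buy_index : List Int) (pred : List Int) (original_n : Int) : Decidable (Pre_combine_test_result buy_index pred original_n) := by unfold Pre_combine_test_result; infer_instance
def pvWitness_combine_test_result : List Int × List Int × Int := ([0, 2], [5, 7], 3)

def Spec_combine_test_result (buy_index : List Int) (pred : List Int) (original_n : Int) (out : List Int) : Prop := out = combine_test_result_alt buy_index pred original_n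
instance (buy_index : List Int) (pred : List Int) (original_n : Int) (out : List Int) : Decidable (Spec_combine_test_result buy_index pred original_n out) := by unfold Spec_combine_test_result; infer_instance

-- ===== CLAIM (what is proved, stated in full; the proofs are below) =====
def Claim_equal_combine_test_result : Prop := ∀ (buy_index : List Int) (pred : List Int) (original_n : Int), Dom_combine_test_result buy_index pred original_n → Pre_combine_test_result buy_index pred original_n → Spec_combine_test_result buy_index pred original_n (combine_test_result buy_index pred original_n)

-- ===== LEMMAS AND PROOFS =====

-- the (nat) indices below n that are in buy_index, in increasing order
def matched_cr (buy : List Int) (n : Nat) : List Nat :=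
  (List.range n).filter (fun k => buy.contains ((k : Nat) : Int))

-- the canonical result vector
def C_cr (buy pred : List Int) (n : Nat) : List Int :=
  (List.range n).map (fun k =>
    if buy.contains ((k : Nat) : Int) then pred.getD (matched_cr buy k).length 0 else 0)

theorem matched_succ (buy : List Int) (n : Nat) :
    matched_cr buy (n + 1) =
      matched_cr buy n ++ (if buy.contains ((n : Nat) : Int) then [n] else []) := by
  simp [matched_cr, List.range_succ, List.filter_append]
  split <;> simp_all

theorem matched_mono (buy : List Int) {k n : Nat} (h : k ≤ n) :
    (matched_cr buy k).length ≤ (matched_cr buy n).length := by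
  induction n with
  | zero =>
    have : k = 0 := by omega
    subst this; exact le_refl _
  | succ m ih =>
    rcases Nat.lt_or_ge k (m + 1) with h' | h'
    · have := ih (by omega)
      rw [matched_succ]
      simp only [List.length_append]
      omega
    · have : k = m + 1 := by omega
      subst this; exact le_refl _

theorem C_succ (buy pred : List Int) (n : Nat) :
    C_cr buy pred (n + 1) =
      C_cr buy pred n ++
        [if buy.contains ((n : Nat) : Int) then pred.getD (matched_cr buy n).length 0 else 0] := by
  simp [C_cr, List.range_succ]

theorem matched_lt (buy : List Int) {n k : Nat} (h : k ∈ matched_cr buy n) : k < n := by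
  simp [matched_cr] at h; exact h.1

theorem matched_length_lt_of_contains (buy : List Int) {n : Nat}
    (hc : buy.contains ((n : Nat) : Int) = true) {m : Nat} (hle : n + 1 ≤ m) :
    (matched_cr buy n).length < (matched_cr buy m).length := by
  have hmem : ((n : Nat) : Int) ∈ buy := by simpa [List.contains_iff_mem] using hc
  have h1 : (matched_cr buy (n + 1)).length = (matched_cr buy n).length + 1 := by
    rw [matched_succ]; simp [hmem]
  have := matched_mono buy hle
  omega

-- A's loop computes (C_cr, matched count)
theorem loopA_eq (buy pred : List Int) (n : Nat)
    (hlen : (matched_cr buy n).length ≤ pred.length) :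
    (PySem.List.pyRange 0 (n : Int) 1).foldl (stepA_cr buy pred) (some ([], 0)) =
      some (C_cr buy pred n, ((matched_cr buy n).length : Int)) := by
  induction n with
  | zero => simp [PySem.List.pyRange_one_eq_nil, matched_cr, C_cr]
  | succ m ih =>
    have hm : (matched_cr buy m).length ≤ pred.length :=
      le_trans (matched_mono buy (Nat.le_succ m)) hlen
    have hsplit : PySem.List.pyRange 0 ((m : Int) + 1) 1 =
        PySem.List.pyRange 0 (m : Int) 1 ++ [(m : Int)] :=
      PySem.List.pyRange_one_succ_right (by positivity)
    push_cast
    rw [hsplit, List.foldl_append, ih hm]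
    simp only [List.foldl_cons, List.foldl_nil, stepA_cr, Option.bind_some]
    by_cases hc : buy.contains ((m : Nat) : Int) = true
    · have hlt : (matched_cr buy m).length < pred.length :=
        lt_of_lt_of_le (matched_length_lt_of_contains buy hc (le_refl _)) hlen
      have hmem : ((m : Nat) : Int) ∈ buy := by simpa [List.contains_iff_mem] using hc
      rw [hc, if_pos rfl]
      rw [PySem.List.pyGet?_natCast]
      rw [List.getElem?_eq_getElem hlt]
      simp only [Option.map_some]
      rw [C_succ, matched_succ]
      simp [hmem, List.getD, List.getElem?_eq_getElem hlt]
    · have hmem : ((m : Nat) : Int) ∉ buy := by simpa [List.contains_iff_mem] using hc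
      simp only [Bool.not_eq_true] at hc
      rw [hc]
      simp only [Bool.false_eq_true, if_false]
      rw [C_succ, matched_succ]
      simp [hmem]

theorem foldl_stepB_none (pred : List Int) (ps : List (Int × Int)) :
    ps.foldl (stepB_cr pred) none = none := by
  induction ps with
  | nil => rfl
  | cons p ps ih => simp [List.foldl_cons, stepB_cr, ih]

-- scatter at in-range positions commutes with appending a tail
theorem scatter_append (pred : List Int) (ps : List (Int × Int)) (t l : List Int)
    (h : ∀ q ∈ ps, 0 ≤ q.2 ∧ q.2 < (l.length : Int)) :
    ps.foldl (stepB_cr pred) (some (l ++ t)) =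
      (ps.foldl (stepB_cr pred) (some l)).map (fun r => r ++ t) := by
  induction ps generalizing l with
  | nil => simp
  | cons q ps ih =>
    simp only [List.foldl_cons, stepB_cr, Option.bind_some]
    rcases hg : PySem.List.pyGet? pred q.1 with _ | v
    · simp [foldl_stepB_none]
    · simp only [Option.map_some]
      obtain ⟨h0, hlt⟩ := h q (List.mem_cons_self ..)
      have hset : PySem.List.pySetD (l ++ t) q.2 v = PySem.List.pySetD l q.2 v ++ t := by
        rw [PySem.List.pySetD_of_nonneg (l ++ t) v h0, PySem.List.pySetD_of_nonneg l v h0]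
        rw [List.set_append]
        have : q.2.toNat < l.length := by omega
        simp [this]
      rw [hset, ih]
      intro p hp
      have := h p (List.mem_cons_of_mem _ hp)
      rw [PySem.List.pySetD_of_nonneg l v h0, List.length_set]
      exact this

-- B's scatter loop over the matched positions builds C_cr
theorem loopB_eq (buy pred : List Int) (n : Nat)
    (hlen : (matched_cr buy n).length ≤ pred.length) :
    (PySem.List.enumerate ((matched_cr buy n).map (fun k => ((k : Nat) : Int))) 0).foldl
        (stepB_cr pred) (some (List.replicate n 0)) =
      some (C_cr buy pred n) := by
  induction n with
  | zero => simp [matched_cr, C_cr]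
  | succ m ih =>
    have hm : (matched_cr buy m).length ≤ pred.length :=
      le_trans (matched_mono buy (Nat.le_succ m)) hlen
    have hrep : List.replicate (m + 1) (0 : Int) = List.replicate m 0 ++ [0] := by
      simp [List.replicate_succ']
    have hbound : ∀ q ∈ PySem.List.enumerate
        ((matched_cr buy m).map (fun k => ((k : Nat) : Int))) 0,
        0 ≤ q.2 ∧ q.2 < ((List.replicate m (0 : Int)).length : Int) := by
      intro q hq
      rw [PySem.List.mem_enumerate_iff] at hq
      obtain ⟨k, hk, rfl⟩ := hq
      rw [List.length_map] at hk
      simp only [List.getElem_map]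
      have hmem : (matched_cr buy m)[k] ∈ matched_cr buy m := List.getElem_mem _
      have := matched_lt buy hmem
      constructor
      · positivity
      · simp only [List.length_replicate]; exact_mod_cast this
    rw [matched_succ]
    by_cases hc : buy.contains ((m : Nat) : Int) = true
    · rw [if_pos hc]
      rw [List.map_append, PySem.List.enumerate_append, List.foldl_append]
      rw [hrep, scatter_append pred _ _ _ hbound, ih hm]
      have hlt : (matched_cr buy m).length < pred.length :=
        lt_of_lt_of_le (matched_length_lt_of_contains buy hc (le_refl _)) hlen
      simp only [Option.map_some, List.map_cons, List.map_nil, List.length_map, zero_add]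
      rw [PySem.List.enumerate_cons]
      simp only [PySem.List.enumerate_nil, List.foldl_cons, List.foldl_nil, stepB_cr,
        Option.bind_some]
      rw [PySem.List.pyGet?_natCast, List.getElem?_eq_getElem hlt]
      simp only [Option.map_some]
      have hClen : (C_cr buy pred m).length = m := by simp [C_cr]
      have hset : PySem.List.pySetD (C_cr buy pred m ++ [0]) ((m : Nat) : Int)
          (pred[(matched_cr buy m).length]) = C_cr buy pred m ++ [pred[(matched_cr buy m).length]] := by
        rw [PySem.List.pySetD_of_nonneg _ _ (by positivity)]
        rw [List.set_append]
        simp [hClen]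
      rw [hset, C_succ]
      have hmem : ((m : Nat) : Int) ∈ buy := by simpa [List.contains_iff_mem] using hc
      simp [hmem, List.getD, List.getElem?_eq_getElem hlt]
    · have hmem : ((m : Nat) : Int) ∉ buy := by simpa [List.contains_iff_mem] using hc
      simp only [Bool.not_eq_true] at hc
      rw [hc]
      simp only [Bool.false_eq_true, if_false, List.append_nil]
      rw [hrep, scatter_append pred _ _ _ hbound, ih hm]
      rw [C_succ]
      simp [hmem]

-- the filtered, deduped, sorted positions are exactly the matched indices in increasing order
theorem positions_eq (buy : List Int) (n : Nat) :
    PySem.List.sorted ((PySem.Set.ofList buy).filter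
        (fun i => decide (0 ≤ i) && decide (i < (n : Int)))) (fun x => x) false =
      (matched_cr buy n).map (fun k => ((k : Nat) : Int)) := by
  apply PySem.List.sorted_eq_of_perm_of_pairwise_lt
  · -- permutation: both are nodup with the same members
    apply (List.perm_ext_iff_of_nodup ?_ ?_).mpr
    · intro x
      simp only [List.mem_filter, List.mem_map]
      constructor
      · rintro ⟨k, hk, rfl⟩
        have hk' := hk
        simp only [matched_cr, List.mem_filter, List.mem_range] at hk'
        refine ⟨?_, ?_⟩
        · rw [PySem.Set.mem_ofList]
          simpa [List.contains_iff_mem] using hk'.2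
        · simp; exact_mod_cast hk'.1
      · rintro ⟨hmem, hcond⟩
        simp only [Bool.and_eq_true, decide_eq_true_eq] at hcond
        obtain ⟨h0, hn⟩ := hcond
        refine ⟨x.toNat, ?_, by omega⟩
        simp only [matched_cr, List.mem_filter, List.mem_range]
        constructor
        · omega
        · rw [PySem.Set.mem_ofList] at hmem
          have : ((x.toNat : Nat) : Int) = x := by omega
          rw [this]; simpa [List.contains_iff_mem] using hmem
    · exact List.Nodup.map (fun a b h => by exact_mod_cast h)
        ((List.nodup_range).filter _)
    · exact List.Nodup.filter _ (PySem.Set.nodup_ofList buy)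
  · -- strictly increasing
    refine List.Pairwise.map _ ?_ ((List.pairwise_lt_range).filter _)
    intro a b h
    exact_mod_cast h

-- Pre_'s count equals the matched count
theorem pre_count_eq (buy : List Int) (n : Nat) :
    ((PySem.Set.ofList buy).filter
        (fun i => decide (0 ≤ i) && decide (i < (n : Int)))).length =
      (matched_cr buy n).length := by
  have h := congrArg List.length (positions_eq buy n)
  rw [PySem.List.length_sorted] at h
  simpa using h

-- ===== VERDICT (by name: the statement is the Claim_ definition above) =====
theorem combine_test_result_spec : Claim_equal_combine_test_result := by
  intro buy_index pred original_n _hdom hpre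
  obtain ⟨h0, hcnt⟩ := hpre
  unfold Spec_combine_test_result
  have hn : original_n = ((original_n.toNat : Nat) : Int) := by omega
  set n := original_n.toNat with hn_def
  rw [hn] at hcnt ⊢
  rw [pre_count_eq] at hcnt
  unfold combine_test_result combine_test_result_alt
  simp only [Int.toNat_natCast]
  rw [loopA_eq buy_index pred n hcnt, positions_eq, loopB_eq buy_index pred n hcnt]
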